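-- pv_equiv track=rewrite | github.com/lucastsui/collatz-research | carry_verify.py | carry_weight_and_carries
-- ===== SOURCE A (Python) =====
-- def carry_weight_and_carries(terms):
--     """
--     Compute total carry generated when adding terms in binary.
--     Returns (total_carry_weight, list_of_carries_per_bit).
--     """
--     if not terms or all(t == 0 for t in terms):
--         return 0, []
--     max_bits = max(t.bit_length() for t in terms if t > 0) + len(terms) + 2
--     total_carry = 0
--     carry = 0
--     carries = []
--     for bit in range(max_bits):
--         col_sum = carry
--         for t in terms:
--             col_sum += (t >> bit) & 1
--         carry = col_sum >> 1  # floor(col_sum / 2)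
--         carries.append(carry)
--         total_carry += carry
--     return total_carry, carries
-- ===== SOURCE B (Python) =====
-- def carry_weight_and_carries(terms):
--     """
--     Compute total carry generated when adding terms in binary.
--     Returns (total_carry_weight, list_of_carries_per_bit).
--     """
--     if not terms or all(t == 0 for t in terms):
--         return 0, []
--     max_bits = max(t.bit_length() for t in terms if t > 0) + len(terms) + 2
--     # Pass 1: per-column set-bit counts, scanning each term's own bits once.
--     # A negative t contributes a 1 in every column except where ~t has a 1,
--     # so count ~t with weight -1 and add one 'neg' per column afterwards.
--     cnt = [0] * max_bits
--     neg = 0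
--     for t in terms:
--         if t < 0:
--             neg += 1
--             u, d = ~t, -1
--         else:
--             u, d = t, 1
--         b = 0
--         while u and b < max_bits:
--             if u & 1:
--                 cnt[b] += d
--             u >>= 1
--             b += 1
--     # Pass 2: single sequential carry propagation over the counts.
--     total = carry = 0
--     carries = []
--     for c in cnt:
--         carry = (carry + c + neg) >> 1
--         carries.append(carry)
--         total += carry
--     return total, carries
-- ===== Notes on version B (the rewrite author's own statement) =====
-- stated objective: faster
-- what changed: A scans every term at every bit column (and each 'col_sum >> bit' touches all the term's words); B scans each term's own set bits once into a per-column count array (counting the complement with weight -1 for negative terms) and then does one sequential carry-propagation pass over the counts.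
import Mathlib
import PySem

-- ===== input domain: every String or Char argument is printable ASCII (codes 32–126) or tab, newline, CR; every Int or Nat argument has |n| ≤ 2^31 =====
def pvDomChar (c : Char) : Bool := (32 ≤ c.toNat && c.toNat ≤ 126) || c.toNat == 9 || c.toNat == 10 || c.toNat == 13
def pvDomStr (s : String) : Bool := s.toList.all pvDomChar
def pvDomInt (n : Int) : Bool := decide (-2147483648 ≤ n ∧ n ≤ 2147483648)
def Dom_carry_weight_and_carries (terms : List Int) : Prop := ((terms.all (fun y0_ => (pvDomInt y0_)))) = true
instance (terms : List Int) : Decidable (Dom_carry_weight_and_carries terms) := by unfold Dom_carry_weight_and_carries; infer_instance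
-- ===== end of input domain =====

-- B replaces A's per-bit scan of all terms by one set-bit scan per term into per-column
-- counts plus a single carry-propagation pass (objective: faster; measured by the check).

-- ===== PORT A =====
def carry_weight_and_carries (terms : List Int) : Int × List Int :=
  if terms = [] ∨ terms.all (fun t => t == 0) then (0, [])
  else
    match PySem.List.max?
        ((terms.filter (fun t => decide (0 < t))).map
          (fun t => ((PySem.Int.bitLength t : Nat) : Int))) (fun x => x) with
    | none => (0, [])  -- Python raises ValueError here (max of empty); excluded by Pre_
    | some m =>
      let max_bits : Int := m + terms.length + 2
      let st := (PySem.List.pyRange 0 max_bits 1).foldl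
        (fun (st : Int × Int × List Int) bit =>
          -- bit ∈ range(max_bits) is nonnegative, so Python's `t >> bit` is `t >>> bit.toNat`
          let col_sum := terms.foldl (fun s t => s + PySem.Int.band (t >>> bit.toNat) 1) st.2.1
          let carry := col_sum >>> (1 : Nat)
          (st.1 + carry, carry, st.2.2 ++ [carry]))
        (0, 0, ([] : List Int))
      (st.1, st.2.2)

-- ===== PORT B =====
-- Source B's inner `while u and b < max_bits:` loop; `rem` = max_bits - b, u ≥ 0 at every call
def cwacScan (d : Int) : Int → Nat → Nat → List Int → List Int
  | _, _, 0, cnt => cnt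
  | u, b, rem + 1, cnt =>
    if u = 0 then cnt
    else
      -- b < max_bits is guaranteed by the loop guard, so cnt[b] is plain in-range indexing
      let cnt' := if PySem.Int.band u 1 ≠ 0 then cnt.set b (cnt.getD b 0 + d) else cnt
      cwacScan d (u >>> (1 : Nat)) (b + 1) rem cnt'

def carry_weight_and_carries_alt (terms : List Int) : Int × List Int :=
  if terms = [] ∨ terms.all (fun t => t == 0) then (0, [])
  else
    match PySem.List.max?
        ((terms.filter (fun t => decide (0 < t))).map
          (fun t => ((PySem.Int.bitLength t : Nat) : Int))) (fun x => x) with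
    | none => (0, [])  -- Python raises ValueError here (max of empty); excluded by Pre_
    | some m =>
      let max_bits : Int := m + terms.length + 2
      let cn := terms.foldl
        (fun (st : List Int × Int) t =>
          if t < 0 then (cwacScan (-1) (Int.not t) 0 max_bits.toNat st.1, st.2 + 1)
          else (cwacScan 1 t 0 max_bits.toNat st.1, st.2))
        (List.replicate max_bits.toNat 0, 0)
      let st := cn.1.foldl
        (fun (st : Int × Int × List Int) c =>
          let carry := (st.2.1 + c + cn.2) >>> (1 : Nat)
          (st.1 + carry, carry, st.2.2 ++ [carry]))
        (0, 0, ([] : List Int))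
      (st.1, st.2.2)

-- ===== PRECONDITION & SPEC =====
-- Pre_ excludes exactly the inputs where Python A raises ValueError (max() of an empty
-- generator): a nonempty list with some nonzero term but no positive term; Source B raises there too.
def Pre_carry_weight_and_carries (terms : List Int) : Prop :=
  terms = [] ∨ (∀ t ∈ terms, t = 0) ∨ (∃ t ∈ terms, 0 < t)
instance (terms : List Int) : Decidable (Pre_carry_weight_and_carries terms) := by
  unfold Pre_carry_weight_and_carries; infer_instance
def pvWitness_carry_weight_and_carries : List Int := [3, -1, 0]

def Spec_carry_weight_and_carries (terms : List Int) (out : Int × List Int) : Prop := out = carry_weight_and_carries_alt terms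
instance (terms : List Int) (out : Int × List Int) : Decidable (Spec_carry_weight_and_carries terms out) := by unfold Spec_carry_weight_and_carries; infer_instance

-- ===== CLAIM (what is proved, stated in full; the proofs are below) =====
def Claim_equal_carry_weight_and_carries : Prop := ∀ (terms : List Int), Dom_carry_weight_and_carries terms → Pre_carry_weight_and_carries terms → Spec_carry_weight_and_carries terms (carry_weight_and_carries terms)

-- ===== LEMMAS AND PROOFS =====

-- column b's 0/1-bit sum over all terms (the value A adds into col_sum at bit b)
def cwacCol (terms : List Int) (b : Nat) : Int :=
  (terms.map (fun t => PySem.Int.band ((t : Int) >>> b) 1)).sum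

-- the shared abstract loop step both ports reduce to
def cwacStep (f : Nat → Int) (st : Int × Int × List Int) (b : Nat) : Int × Int × List Int :=
  let carry := (st.2.1 + f b) / 2
  (st.1 + carry, carry, st.2.2 ++ [carry])

theorem cwac_shr_one (a : Int) : a >>> (1 : Nat) = a / 2 := by
  simpa using Int.shiftRight_eq_div_pow a 1

theorem cwac_shr_shr (a : Int) (k : Nat) : (a >>> (1 : Nat)) >>> k = a >>> (k + 1) := by
  simp only [Int.shiftRight_eq_div_pow]
  rw [Int.ediv_ediv_of_nonneg (by positivity)]
  push_cast [← pow_succ']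
  ring_nf

theorem cwac_not (t : Int) : Int.not t = -t - 1 := by
  unfold Int.not
  cases t <;> simp [Int.negSucc_eq] <;> omega

theorem cwac_band_one (a : Int) : PySem.Int.band a 1 = a % 2 := by
  rw [PySem.Int.band_one, PySem.Int.mod_eq_emod_of_pos (by omega)]

-- floor division: (-a-1)/d = -(a/d)-1 for d > 0
theorem cwac_neg_div (a d : Int) (hd : 0 < d) : (-a - 1) / d = -(a / d) - 1 := by
  have h1 := Int.mul_ediv_add_emod a d
  have h2 : 0 ≤ a % d := Int.emod_nonneg a (by omega)
  have h3 : a % d < d := Int.emod_lt_of_pos a hd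
  have h4 : -a - 1 = (d - a % d - 1) + (-(a / d) - 1) * d := by ring_nf; omega
  rw [h4, Int.add_mul_ediv_right _ _ (by omega : d ≠ 0),
    Int.ediv_eq_zero_of_lt (by omega) (by omega)]
  ring

theorem cwac_not_shr (t : Int) (k : Nat) : (Int.not t) >>> k = Int.not (t >>> k) := by
  simp only [Int.shiftRight_eq_div_pow, cwac_not]
  exact cwac_neg_div t _ (by positivity)

-- cwacScan preserves length
theorem cwacScan_length (d : Int) (R : Nat) : ∀ (u : Int) (b : Nat) (cnt : List Int),
    (cwacScan d u b R cnt).length = cnt.length := by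
  induction R with
  | zero => intro u b cnt; rfl
  | succ R ih =>
    intro u b cnt
    rw [cwacScan]
    split
    · rfl
    · rw [ih]; split <;> simp

-- what cwacScan adds at each in-range index
theorem cwacScan_getD (d : Int) (R : Nat) : ∀ (u : Int) (b : Nat) (cnt : List Int), 0 ≤ u →
    ∀ j, j < cnt.length →
    (cwacScan d u b R cnt).getD j 0 =
      cnt.getD j 0 + (if b ≤ j ∧ j < b + R then d * ((u >>> (j - b)) % 2) else 0) := by
  induction R with
  | zero =>
    intro u b cnt _ j _
    simp only [cwacScan]
    have hno : ¬ (b ≤ j ∧ j < b + 0) := by omega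
    rw [if_neg hno, add_zero]
  | succ R ih =>
    intro u b cnt hu j hj
    rw [cwacScan]
    split
    · subst u
      simp [Int.shiftRight_eq_div_pow]
    · rename_i hu0
      set cnt' := if PySem.Int.band u 1 ≠ 0 then cnt.set b (cnt.getD b 0 + d) else cnt with hcnt'
      have hlen' : cnt'.length = cnt.length := by rw [hcnt']; split <;> simp
      have hu' : 0 ≤ u >>> (1 : Nat) := by
        rw [cwac_shr_one]; exact Int.ediv_nonneg hu (by omega)
      have hrec := ih (u >>> (1 : Nat)) (b + 1) cnt' hu' j (by omega)
      rw [hrec]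
      have hb1 : PySem.Int.band u 1 = u % 2 := cwac_band_one u
      by_cases hjb : j = b
      · subst j
        have hcond : b ≤ b ∧ b < b + (R + 1) := by omega
        have hcond' : ¬ (b + 1 ≤ b ∧ b < b + 1 + R) := by omega
        simp only [hcond, hcond', if_true, if_false, and_self, add_zero]
        have hshr0 : u >>> (b - b) = u := by simp [Int.shiftRight_eq_div_pow]
        rw [hshr0]
        rw [hcnt']
        by_cases hodd : u % 2 = 0
        · rw [hb1]; simp [hodd]
        · have h1 : u % 2 = 1 := by omega
          rw [hb1, h1]
          rw [if_pos (by simp)]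
          rw [List.getD_eq_getElem?_getD, List.getElem?_set_self (by omega)]
          simp
      · have hget' : cnt'.getD j 0 = cnt.getD j 0 := by
          rw [hcnt']; split
          · rw [List.getD_eq_getElem?_getD, List.getElem?_set_ne (by omega : b ≠ j),
              ← List.getD_eq_getElem?_getD]
          · rfl
        rw [hget']
        by_cases hin : b ≤ j ∧ j < b + (R + 1)
        · have hin' : b + 1 ≤ j ∧ j < b + 1 + R := by omega
          rw [if_pos hin, if_pos hin', cwac_shr_shr]
          have harg : j - (b + 1) + 1 = j - b := by omega
          rw [harg]
        · have hin' : ¬ (b + 1 ≤ j ∧ j < b + 1 + R) := by omega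
          rw [if_neg hin, if_neg hin']

-- the per-term contribution identity: bit b of t, via the complement trick for t < 0
theorem cwac_contrib_neg (t : Int) (_ht : t < 0) (b : Nat) :
    PySem.Int.band (t >>> b) 1 = 1 - (Int.not t >>> b) % 2 := by
  rw [cwac_band_one, cwac_not_shr, cwac_not]
  have h2 : (0 : Int) < 2 := by omega
  have := Int.emod_nonneg (t >>> b) (by omega : (2:Int) ≠ 0)
  have := Int.emod_lt_of_pos (t >>> b) h2
  omega

-- the counting pass: after folding all terms, cnt[j] + neg = column sum at j
theorem cwac_count_pass (M : Nat) (terms : List Int) :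
    ∀ (cnt0 : List Int) (neg0 : Int), cnt0.length = M →
    (let cn := terms.foldl
        (fun (st : List Int × Int) t =>
          if t < 0 then (cwacScan (-1) (Int.not t) 0 M st.1, st.2 + 1)
          else (cwacScan 1 t 0 M st.1, st.2))
        (cnt0, neg0)
     cn.1.length = M ∧ ∀ j, j < M →
       cn.1.getD j 0 + cn.2 = cnt0.getD j 0 + neg0 + cwacCol terms j) := by
  induction terms with
  | nil => intro cnt0 neg0 h; exact ⟨h, by simp [cwacCol]⟩
  | cons t ts ih =>
    intro cnt0 neg0 h
    simp only [List.foldl_cons]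
    by_cases ht : t < 0
    · simp only [ht, if_true]
      have hlen : (cwacScan (-1) (Int.not t) 0 M cnt0).length = M := by
        rw [cwacScan_length]; exact h
      have hrec := ih (cwacScan (-1) (Int.not t) 0 M cnt0) (neg0 + 1) hlen
      refine ⟨hrec.1, fun j hj => ?_⟩
      rw [hrec.2 j hj]
      have hnot : 0 ≤ Int.not t := by rw [cwac_not]; omega
      have hs := cwacScan_getD (-1) M (Int.not t) 0 cnt0 hnot j (by omega)
      have hcond : 0 ≤ j ∧ j < 0 + M := by omega
      rw [hs]
      simp only [hcond, if_true, and_self, Nat.sub_zero]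
      have hc := cwac_contrib_neg t ht j
      simp only [cwacCol, List.map_cons, List.sum_cons, hc]
      ring
    · simp only [ht, if_false]
      have h0t : 0 ≤ t := by omega
      have hlen : (cwacScan 1 t 0 M cnt0).length = M := by
        rw [cwacScan_length]; exact h
      have hrec := ih (cwacScan 1 t 0 M cnt0) neg0 hlen
      refine ⟨hrec.1, fun j hj => ?_⟩
      rw [hrec.2 j hj]
      have hs := cwacScan_getD 1 M t 0 cnt0 h0t j (by omega)
      have hcond : 0 ≤ j ∧ j < 0 + M := by omega
      rw [hs]
      simp only [hcond, if_true, and_self, Nat.sub_zero]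
      have hb : PySem.Int.band (t >>> j) 1 = (t >>> j) % 2 := cwac_band_one _
      simp only [cwacCol, List.map_cons, List.sum_cons, hb]
      ring

-- any list is the range-map of its own getD
theorem cwac_list_eq_map_range (L : List Int) :
    L = (List.range L.length).map (fun j => L.getD j 0) := by
  apply List.ext_getElem
  · simp
  · intro i h1 h2
    simp [List.getD_eq_getElem?_getD, List.getElem?_eq_getElem h1]

-- folding a step function over range = fold of cwacStep when values agree pointwise
theorem cwac_foldl_congr (M : Nat) (f g : Nat → Int) (h : ∀ j, j < M → f j = g j)
    (st : Int × Int × List Int) :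
    (List.range M).foldl (cwacStep f) st = (List.range M).foldl (cwacStep g) st := by
  induction M generalizing st with
  | zero => rfl
  | succ M ih =>
    rw [List.range_succ, List.foldl_append, List.foldl_append,
      ih (fun j hj => h j (by omega))]
    simp [cwacStep, h M (by omega)]

-- A's loop body over pyRange is a fold of cwacStep (cwacCol terms) over List.range
theorem cwac_a_fold (terms : List Int) (M : Int) (hM : 0 ≤ M) :
    (PySem.List.pyRange 0 M 1).foldl
      (fun (st : Int × Int × List Int) bit =>
        let col_sum := terms.foldl (fun s t => s + PySem.Int.band (t >>> bit.toNat) 1) st.2.1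
        let carry := col_sum >>> (1 : Nat)
        (st.1 + carry, carry, st.2.2 ++ [carry]))
      (0, 0, ([] : List Int)) =
    (List.range M.toNat).foldl (cwacStep (cwacCol terms)) (0, 0, ([] : List Int)) := by
  rw [PySem.List.pyRange_one, List.foldl_map]
  have : (M - 0).toNat = M.toNat := by omega
  rw [this]
  congr 1
  funext st k
  simp only [cwacStep, cwacCol]
  rw [PySem.List.foldl_add, cwac_shr_one]
  congr 2 <;> simp [Int.toNat_natCast]

-- ===== VERDICT (by name: the statement is the Claim_ definition above) =====
theorem carry_weight_and_carries_spec : Claim_equal_carry_weight_and_carries := by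
  intro terms _hdom _hpre
  unfold Spec_carry_weight_and_carries carry_weight_and_carries carry_weight_and_carries_alt
  split
  · rfl
  split
  · rfl
  rename_i m hm
  set M : Int := m + terms.length + 2 with hM
  have hm0 : 0 ≤ m := by
    have hmem := PySem.List.max?_mem hm
    obtain ⟨t, -, rfl⟩ := List.mem_map.mp hmem
    positivity
  have hM0 : 0 ≤ M := by
    have : (0 : Int) ≤ terms.length := by positivity
    omega
  simp only
  rw [cwac_a_fold terms M hM0]
  -- characterise B's counting pass
  have hcp := cwac_count_pass M.toNat terms (List.replicate M.toNat 0) 0 (by simp)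
  set cn := terms.foldl
      (fun (st : List Int × Int) t =>
        if t < 0 then (cwacScan (-1) (Int.not t) 0 M.toNat st.1, st.2 + 1)
        else (cwacScan 1 t 0 M.toNat st.1, st.2))
      (List.replicate M.toNat 0, 0) with hcn
  obtain ⟨hlen, hval⟩ := hcp
  have hval' : ∀ j, j < M.toNat → cn.1.getD j 0 + cn.2 = cwacCol terms j := by
    intro j hj
    have := hval j hj
    simpa [List.getD_replicate] using this
  -- B's second pass as a fold of cwacStep over List.range
  have hb2 : cn.1.foldl
      (fun (st : Int × Int × List Int) c =>
        let carry := (st.2.1 + c + cn.2) >>> (1 : Nat)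
        (st.1 + carry, carry, st.2.2 ++ [carry]))
      (0, 0, ([] : List Int)) =
      (List.range M.toNat).foldl (cwacStep (cwacCol terms)) (0, 0, ([] : List Int)) := by
    conv_lhs => rw [cwac_list_eq_map_range cn.1]
    rw [List.foldl_map, hlen]
    have : ∀ (st : Int × Int × List Int) (j : Nat),
        (let carry := (st.2.1 + cn.1.getD j 0 + cn.2) >>> (1 : Nat)
         ((st.1 + carry, carry, st.2.2 ++ [carry]) : Int × Int × List Int)) =
        cwacStep (fun j => cn.1.getD j 0 + cn.2) st j := by
      intro st j
      simp [cwacStep, cwac_shr_one, add_assoc]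
    simp only [this]
    exact cwac_foldl_congr M.toNat _ _ (fun j hj => hval' j hj) _
  rw [hb2]

-- pvWitness satisfies Dom and Pre
theorem cwac_witness_ok :
    Dom_carry_weight_and_carries pvWitness_carry_weight_and_carries ∧
    Pre_carry_weight_and_carries pvWitness_carry_weight_and_carries := by decide
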